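-- pv_equiv track=rewrite | github.com/Lean-Agent-Protocol/Lap-benchmark-docs | harness/minifier.py | _find_proto_comment
-- ===== SOURCE A (Python) =====
-- def _find_proto_comment(line: str) -> int | None:
--     """Find position of // comment in protobuf line (not inside strings)."""
--     in_string = False
--     escape = False
--     i = 0
--     while i < len(line):
--         ch = line[i]
--         if escape:
--             escape = False
--             i += 1
--             continue
--         if ch == "\\":
--             escape = True
--             i += 1
--             continue
--         if ch == '"':
--             in_string = not in_string
--         elif ch == "/" and not in_string and i + 1 < len(line) and line[i + 1] == "/":
--             return i
--         i += 1
--     return None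
-- ===== SOURCE B (Python) =====
-- def _find_proto_comment(line: str) -> int | None:
--     """Find position of // comment in protobuf line (not inside strings)."""
--     start = 0
--     while True:
--         i = line.find("//", start)
--         if i == -1:
--             return None
--         in_string = False
--         escape = False
--         for ch in line[:i]:
--             if escape:
--                 escape = False
--             elif ch == "\\":
--                 escape = True
--             elif ch == '"':
--                 in_string = not in_string
--         if not escape and not in_string:
--             return i
--         start = i + 1
-- ===== Notes on version B (the rewrite author's own statement) =====
-- stated objective: faster
-- what changed: B enumerates comment-marker candidate positions with str.find(start) and validates each candidate by re-scanning its prefix with the in_string/escape state machine, instead of A's single char-by-char Python loop with inline lookahead.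
import Mathlib
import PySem

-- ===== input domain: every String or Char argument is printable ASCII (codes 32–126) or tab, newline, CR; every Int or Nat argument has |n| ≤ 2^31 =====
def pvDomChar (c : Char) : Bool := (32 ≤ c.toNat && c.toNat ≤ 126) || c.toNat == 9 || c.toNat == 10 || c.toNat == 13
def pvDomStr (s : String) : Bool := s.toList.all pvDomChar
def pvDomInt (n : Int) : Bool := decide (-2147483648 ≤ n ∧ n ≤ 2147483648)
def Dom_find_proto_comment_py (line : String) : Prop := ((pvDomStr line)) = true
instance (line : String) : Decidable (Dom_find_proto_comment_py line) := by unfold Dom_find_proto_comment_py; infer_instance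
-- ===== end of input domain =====

-- B finds comment-marker candidates with str.find (C-level scan) and re-validates each prefix, instead of A's single char-by-char Python loop; same results, measurably faster.

-- ===== PORT A =====
-- while-loop over indices ported as structural recursion on the remaining characters,
-- carrying the index i and the in_string/escape flags; the `line[i+1] == "/"` lookahead
-- (with its `i + 1 < len(line)` guard) is exactly `rest.head? == some '/'`.
def goA : List Char → Int → Bool → Bool → Option Int
  | [], _, _, _ => none
  | ch :: rest, i, inString, escape =>
    if escape then goA rest (i + 1) inString false
    else if ch == '\\' then goA rest (i + 1) inString true
    else if ch == '"' then goA rest (i + 1) (!inString) escape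
    else if ch == '/' && !inString && rest.head? == some '/' then some i
    else goA rest (i + 1) inString escape

def find_proto_comment_py (line : String) : Option Int :=
  goA line.toList 0 false false

-- ===== PORT B =====
-- the `for ch in line[:i]` validator of Source B, as a fold over the taken prefix
def pvStep (st : Bool × Bool) (ch : Char) : Bool × Bool :=
  if st.2 then (st.1, false)
  else if ch == '\\' then (st.1, true)
  else if ch == '"' then (!st.1, false)
  else st

def pvScan (cs : List Char) : Bool × Bool := cs.foldl pvStep (false, false)

-- the `while True` loop of Source B; `line.find("//", start)` is PySem.Chars.findFrom.
-- fuel only makes the loop total; the proof shows length + 1 fuel always suffices.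
def altLoop (cs : List Char) (fuel : Nat) (start : Nat) : Option Int :=
  match fuel with
  | 0 => none
  | Nat.succ fuel =>
    let i := PySem.Chars.findFrom cs ['/', '/'] (start : Int)
    if i = -1 then none
    else
      let st := pvScan (cs.take i.toNat)
      if !st.2 && !st.1 then some i
      else altLoop cs fuel (i.toNat + 1)

def find_proto_comment_py_alt (line : String) : Option Int :=
  altLoop line.toList (line.toList.length + 1) 0

-- ===== PRECONDITION & SPEC =====
def Spec_find_proto_comment_py (line : String) (out : Option Int) : Prop := out = find_proto_comment_py_alt line
instance (line : String) (out : Option Int) : Decidable (Spec_find_proto_comment_py line out) := by unfold Spec_find_proto_comment_py; infer_instance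

-- ===== CLAIM (what is proved, stated in full; the proofs are below) =====
def Claim_equal_find_proto_comment_py : Prop := ∀ (line : String), Dom_find_proto_comment_py line → Spec_find_proto_comment_py line (find_proto_comment_py line)

-- ===== LEMMAS AND PROOFS =====

-- common characterisation: position k is a valid comment start
def pvOk (cs : List Char) (k : Nat) : Bool :=
  decide ((['/', '/'] <+: cs.drop k) ∧ pvScan (cs.take k) = (false, false))

-- first valid position at or after k
def firstOk (cs : List Char) (k : Nat) : Option Nat :=
  if h : k < cs.length then
    if pvOk cs k then some k else firstOk cs (k + 1)
  else none
  termination_by cs.length - k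
  decreasing_by omega

theorem prefix_two_cons (c : Char) (rest : List Char) :
    (['/', '/'] <+: c :: rest) ↔ (c = '/' ∧ rest.head? = some '/') := by
  cases rest with
  | nil => simp [List.cons_prefix_cons]
  | cons d t => simp [List.cons_prefix_cons, eq_comm]

theorem pvScan_concat (pre : List Char) (ch : Char) :
    pvScan (pre ++ [ch]) = pvStep (pvScan pre) ch := by
  simp [pvScan, List.foldl_append]

theorem A_eq : ∀ (l pre : List Char),
    goA l (pre.length : Int) (pvScan pre).1 (pvScan pre).2
      = (firstOk (pre ++ l) pre.length).map (fun n => (n : Int)) := by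
  intro l
  induction l with
  | nil =>
    intro pre
    rw [firstOk]
    simp [goA]
  | cons ch rest ih =>
    intro pre
    have hlen : pre.length < (pre ++ ch :: rest).length := by simp
    have hdrop : (pre ++ ch :: rest).drop pre.length = ch :: rest := by
      simpa using List.drop_left pre (ch :: rest)
    have htake : (pre ++ ch :: rest).take pre.length = pre := by
      simpa using List.take_left pre (ch :: rest)
    have hih := ih (pre ++ [ch])
    rw [pvScan_concat] at hih
    have hlen1 : ((pre ++ [ch]).length : Int) = (pre.length : Int) + 1 := by
      simp
    have happ : (pre ++ [ch]) ++ rest = pre ++ ch :: rest := by simp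
    have hlen2 : (pre ++ [ch]).length = pre.length + 1 := by simp
    rw [hlen1, happ, hlen2] at hih
    rw [firstOk, dif_pos hlen]
    rcases hsc : pvScan pre with ⟨s, e⟩
    rw [hsc] at hih
    cases e with
    | true =>
      have hok : pvOk (pre ++ ch :: rest) pre.length = false := by
        simp [pvOk, htake, hsc]
      rw [hok]
      simp only [goA, pvStep] at hih ⊢
      simpa using hih
    | false =>
      by_cases hq3 : ch = '/' ∧ s = false ∧ rest.head? = some '/'
      · obtain ⟨h1, h2, h3⟩ := hq3
        subst h1; subst h2
        have hpr : ['/'] <+: rest := by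
          cases rest with
          | nil => simp at h3
          | cons d t =>
            simp only [List.head?_cons, Option.some.injEq] at h3
            subst h3
            exact ⟨t, rfl⟩
        have hok : pvOk (pre ++ '/' :: rest) pre.length = true := by
          simp [pvOk, hdrop, htake, hsc, prefix_two_cons, h3, hpr]
        rw [hok]
        simp [goA, h3]
      · have hok : pvOk (pre ++ ch :: rest) pre.length = false := by
          simp only [pvOk, hdrop, htake, hsc, prefix_two_cons, decide_eq_false_iff_not,
            Prod.mk.injEq]
          tauto
        rw [hok]
        by_cases hsl : ch = '\\'
        · subst hsl
          simp only [goA, pvStep] at hih ⊢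
          simpa using hih
        · by_cases hqt : ch = '"'
          · subst hqt
            simp only [goA, pvStep] at hih ⊢
            simpa using hih
          · have hcond : (ch == '/' && !s && rest.head? == some '/') = false := by
              by_cases hc : ch = '/'
              · subst hc
                rcases Bool.eq_false_or_eq_true s with hs | hs
                · subst hs; simp
                · subst hs
                  have hh : rest.head? ≠ some '/' := fun hh => hq3 ⟨rfl, rfl, hh⟩
                  simp [hh]
              · simp [hc]
            simp only [goA, pvStep, hsl, hqt] at hih ⊢
            simp only [beq_iff_eq, hsl, hqt, if_false, Bool.false_eq_true, hcond] at hih ⊢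
            simpa using hih

theorem firstOk_step (cs : List Char) (start : Nat) (h : pvOk cs start = false) :
    firstOk cs start = firstOk cs (start + 1) := by
  rw [firstOk]
  by_cases hl : start < cs.length
  · simp [hl, h]
  · rw [firstOk]
    have h1 : ¬ (start + 1 < cs.length) := by omega
    simp [hl, h1]

theorem firstOk_skip (cs : List Char) :
    ∀ (d start : Nat), (∀ j, start ≤ j → j < start + d → pvOk cs j = false) →
      firstOk cs start = firstOk cs (start + d) := by
  intro d
  induction d with
  | zero => intro start _; rfl
  | succ d ih =>
    intro start h
    rw [firstOk_step cs start (h start le_rfl (by omega))]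
    rw [ih (start + 1) (fun j hj1 hj2 => h j (by omega) (by omega))]
    ring_nf

theorem firstOk_none (cs : List Char) :
    ∀ (fuel start : Nat), cs.length - start ≤ fuel →
      (∀ j, start ≤ j → pvOk cs j = false) → firstOk cs start = none := by
  intro fuel
  induction fuel with
  | zero =>
    intro start hf _
    rw [firstOk]
    have : ¬ (start < cs.length) := by omega
    simp [this]
  | succ fuel ih =>
    intro start hf h
    rw [firstOk]
    by_cases hl : start < cs.length
    · rw [dif_pos hl, h start le_rfl]
      simp only [Bool.false_eq_true, if_false]
      exact ih (start + 1) (by omega) (fun j hj => h j (by omega))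
    · simp [hl]

theorem B_eq (cs : List Char) :
    ∀ (fuel start : Nat), start ≤ cs.length → cs.length + 1 - start ≤ fuel →
      altLoop cs fuel start = (firstOk cs start).map (fun n => (n : Int)) := by
  intro fuel
  induction fuel with
  | zero => intro start h1 h2; omega
  | succ fuel ih =>
    intro start hstart hfuel
    rw [altLoop]
    by_cases hi : PySem.Chars.findFrom cs ['/', '/'] (start : Int) = -1
    · simp only [hi, if_pos rfl]
      have hninf := (PySem.Chars.findFrom_natCast_eq_neg_one_iff cs ['/', '/'] start hstart).mp hi
      have hall : ∀ j, start ≤ j → pvOk cs j = false := by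
        intro j hj
        have : ¬ (['/', '/'] <+: cs.drop j) := by
          intro hp
          apply hninf
          have hdd : cs.drop j = (cs.drop start).drop (j - start) := by
            rw [List.drop_drop]
            congr 1
            omega
          rw [hdd] at hp
          exact hp.isInfix.trans (List.drop_suffix _ _).isInfix
        simp [pvOk, this]
      rw [firstOk_none cs (cs.length - start) start (by omega) hall]
      rfl
    · rw [if_neg hi]
      obtain ⟨hge, hpre, hmin⟩ := PySem.Chars.findFrom_natCast_spec cs ['/', '/'] start hstart hi
      set i := PySem.Chars.findFrom cs ['/', '/'] (start : Int) with hidef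
      have hi0 : (0 : Int) ≤ i := le_trans (Int.natCast_nonneg start) hge
      have hit : i = (i.toNat : Int) := (Int.toNat_of_nonneg hi0).symm
      set t := i.toNat with htdef
      have hstart_t : start ≤ t := by omega
      have htlen : t + 2 ≤ cs.length := by
        have := hpre.length_le
        simp [List.length_drop] at this
        omega
      have hskip : firstOk cs start = firstOk cs t := by
        have := firstOk_skip cs (t - start) start (fun j hj1 hj2 => by
          have : ¬ (['/', '/'] <+: cs.drop j) := hmin j hj1 (by omega)
          simp [pvOk, this])
        rwa [Nat.add_sub_cancel' hstart_t] at this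
      rw [hskip]
      rcases hsc : pvScan (cs.take t) with ⟨s, e⟩
      by_cases hcond : s = false ∧ e = false
      · obtain ⟨hs, he⟩ := hcond
        subst hs; subst he
        have hok : pvOk cs t = true := by simp [pvOk, hpre, hsc]
        rw [firstOk, dif_pos (by omega : t < cs.length), hok]
        simp only [hsc, Bool.not_false, Bool.and_self, if_true]
        exact congrArg some hit
      · have hcondb : (!e && !s) = false := by
          cases s with
          | true => simp
          | false =>
            cases e with
            | true => simp
            | false => exact absurd ⟨rfl, rfl⟩ hcond
        have hok : pvOk cs t = false := by
          have : ¬ (pvScan (cs.take t) = (false, false)) := by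
            rw [hsc]; intro h; exact hcond ⟨congrArg Prod.fst h, congrArg Prod.snd h⟩
          simp [pvOk, this]
        rw [firstOk_step cs t hok]
        simp only [hcondb, Bool.false_eq_true, if_false]
        exact ih (t + 1) (by omega) (by omega)

-- ===== VERDICT (by name: the statement is the Claim_ definition above) =====
theorem find_proto_comment_py_spec : Claim_equal_find_proto_comment_py := by
  intro line _
  unfold Spec_find_proto_comment_py find_proto_comment_py find_proto_comment_py_alt
  have hA := A_eq line.toList []
  simp only [pvScan, List.foldl_nil, List.length_nil, Nat.cast_zero, List.nil_append] at hA
  have hB := B_eq line.toList (line.toList.length + 1) 0 (Nat.zero_le _) (by omega)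
  rw [hA, hB]
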